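-- pv_equiv track=rewrite | github.com/binisalegend/Road-To-CSAI | Programming-Methods-and-Practice/MatchCode/test.py | min_special_positions
-- ===== SOURCE A (Python) =====
-- def min_special_positions(matrix_list):
--     unique_positions = set()  # 用来存储不同矩阵的特殊位置
--
--     for i in range(len(matrix_list) - 1):
--         for j in range(i + 1, len(matrix_list)):
--             found = False
--             for x in range(len(matrix_list[i])):
--                 for y in range(len(matrix_list[i][0])):
--                     if matrix_list[i][x][y] != matrix_list[j][x][y]:
--                         unique_positions.add((x, y))
--                         found = True
--                         break
--                 if found:
--                     break
--
--     return len(unique_positions)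
-- ===== SOURCE B (Python) =====
-- def min_special_positions(matrix_list):
--     # Sort matrices lexicographically; every pairwise first-difference position
--     # already occurs between some adjacent pair of the sorted order.
--     ordered = sorted(matrix_list)
--     positions = set()
--     for a, b in zip(ordered, ordered[1:]):
--         for x, (ra, rb) in enumerate(zip(a, b)):
--             if ra != rb:
--                 y = next(k for k, (u, v) in enumerate(zip(ra, rb)) if u != v)
--                 positions.add((x, y))
--                 break
--     return len(positions)
-- ===== Notes on version B (the rewrite author's own statement) =====
-- stated objective: faster
-- what changed: B sorts the matrices lexicographically once and collects first-difference positions of adjacent pairs only, instead of A's scan of all P(P-1)/2 pairs.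
-- outside the precondition, e.g. on min_special_positions([[[1], [2, 7]], [[1], [2, 8]]]): A returns 0, B returns 1; on min_special_positions([[[1, 2]], [[1], [3]]]): A raises IndexError, B raises StopIteration
import Mathlib
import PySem

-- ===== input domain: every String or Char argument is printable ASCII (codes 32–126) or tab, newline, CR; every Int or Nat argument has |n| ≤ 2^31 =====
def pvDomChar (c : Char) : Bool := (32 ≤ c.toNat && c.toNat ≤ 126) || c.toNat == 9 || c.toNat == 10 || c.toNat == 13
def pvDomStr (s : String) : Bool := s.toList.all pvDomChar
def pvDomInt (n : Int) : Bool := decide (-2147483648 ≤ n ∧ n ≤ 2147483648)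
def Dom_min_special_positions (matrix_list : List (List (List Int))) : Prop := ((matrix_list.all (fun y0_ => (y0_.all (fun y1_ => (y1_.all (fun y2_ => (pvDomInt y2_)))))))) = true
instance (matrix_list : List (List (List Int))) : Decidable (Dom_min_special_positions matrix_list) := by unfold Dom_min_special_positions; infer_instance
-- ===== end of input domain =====

-- B sorts the matrices once and looks only at adjacent pairs instead of all P(P-1)/2 pairs
-- (objective: faster, O(P^2·N) → O(P log P·N)); return values proved equal on same-shape inputs.

-- ===== PORT A =====
-- inner 'for y in range(...)' loop with its break and the 'found' flag
def aLoopY (mi mj : List (List Int)) (x : Int) :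
    List Int → PySem.Set (Int × Int) → PySem.Set (Int × Int) × Bool
  | [], s => (s, false)
  | y :: ys, s =>
      if PySem.List.pyGetD (PySem.List.pyGetD mi x []) y 0 ≠
         PySem.List.pyGetD (PySem.List.pyGetD mj x []) y 0 then
        (PySem.Set.add s (x, y), true)
      else aLoopY mi mj x ys s

-- outer 'for x in range(len(matrix_list[i]))' loop with its 'if found: break'
def aLoopX (mi mj : List (List Int)) :
    List Int → PySem.Set (Int × Int) → PySem.Set (Int × Int)
  | [], s => s
  | x :: xs, s =>
      let r := aLoopY mi mj x
        (PySem.List.pyRange 0 ((PySem.List.pyGetD mi 0 []).length : Int) 1) s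
      if r.2 then r.1 else aLoopX mi mj xs r.1

def min_special_positions (matrix_list : List (List (List Int))) : Int :=
  let n : Int := matrix_list.length
  let s :=
    (PySem.List.pyRange 0 (n - 1) 1).foldl (fun s i =>
      (PySem.List.pyRange (i + 1) n 1).foldl (fun s j =>
        aLoopX (PySem.List.pyGetD matrix_list i []) (PySem.List.pyGetD matrix_list j [])
          (PySem.List.pyRange 0 (((PySem.List.pyGetD matrix_list i []).length : Int)) 1) s) s)
      PySem.Set.empty
  PySem.Set.len s

-- ===== PORT B =====
-- 'next(k for k, (u, v) in enumerate(zip(ra, rb)) if u != v)'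
def bNext : List (Int × (Int × Int)) → Option Int
  | [] => none
  | (k, uv) :: rest => if uv.1 ≠ uv.2 then some k else bNext rest

-- 'for x, (ra, rb) in enumerate(zip(a, b)): if ra != rb: … break'
-- (.getD 0 is never used under Pre_: ra ≠ rb with equal row lengths guarantees a hit,
--  exactly where Source B's next() would otherwise raise StopIteration)
def bFindPos : List (Int × (List Int × List Int)) → Option (Int × Int)
  | [] => none
  | (x, rr) :: rest =>
      if rr.1 ≠ rr.2 then
        some (x, (bNext (PySem.List.enumerate (rr.1.zip rr.2) 0)).getD 0)
      else bFindPos rest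

-- 'for a, b in zip(ordered, ordered[1:]): …'
def bLoop : List (List (List Int) × List (List Int)) → PySem.Set (Int × Int) → PySem.Set (Int × Int)
  | [], s => s
  | ab :: rest, s =>
      match bFindPos (PySem.List.enumerate (ab.1.zip ab.2) 0) with
      | some p => bLoop rest (PySem.Set.add s p)
      | none => bLoop rest s

def min_special_positions_alt (matrix_list : List (List (List Int))) : Int :=
  let ordered := PySem.List.sorted matrix_list (fun x => x) false
  let s := bLoop (ordered.zip ordered.tail) PySem.Set.empty
  PySem.Set.len s

-- ===== PRECONDITION & SPEC =====
-- helpers for the third Pre_ disjunct: a pair of matrices is harmless for A's scan if the two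
-- are equal (and wide enough not to raise), or both have a first cell and those cells differ
def Rect (m : List (List Int)) : Prop := ∀ r ∈ m, (m.headD []).length ≤ r.length
def NE1 (m : List (List Int)) : Prop := m ≠ [] ∧ m.headD [] ≠ []
def PairOK (m m' : List (List Int)) : Prop :=
  (m = m' ∧ Rect m) ∨
    (NE1 m ∧ NE1 m' ∧ (m.headD []).headD 0 ≠ (m'.headD []).headD 0)

-- Pre_ admits: at most one matrix; or matrices of one uniform shape; or lists whose pairs are
-- each equal or decided at cell (0,0). It excludes other non-uniformly-shaped lists: there A
-- either raises IndexError or silently truncates each scan to the first matrix's dimensions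
-- (an artefact of its implementation), and B's zip-truncated scan need not match.
def Pre_min_special_positions (matrix_list : List (List (List Int))) : Prop :=
  matrix_list.length ≤ 1 ∨
    (∀ m ∈ matrix_list, ∀ m' ∈ matrix_list,
      m.length = m'.length ∧ ∀ r ∈ m, ∀ r' ∈ m', r.length = r'.length) ∨
    matrix_list.Pairwise PairOK

instance (matrix_list : List (List (List Int))) : Decidable (Pre_min_special_positions matrix_list) := by
  unfold Pre_min_special_positions PairOK NE1 Rect; infer_instance

def pvWitness_min_special_positions : List (List (List Int)) :=
  [[[1, 2], [3, 4]], [[1, 2], [5, 4]], [[1, 9], [3, 4]]]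

def Spec_min_special_positions (matrix_list : List (List (List Int))) (out : Int) : Prop :=
  out = min_special_positions_alt matrix_list
instance (matrix_list : List (List (List Int))) (out : Int) : Decidable (Spec_min_special_positions matrix_list out) := by
  unfold Spec_min_special_positions; infer_instance

-- ===== CLAIM (what is proved, stated in full; the proofs are below) =====
def Claim_equal_min_special_positions : Prop :=
  ∀ (matrix_list : List (List (List Int))), Dom_min_special_positions matrix_list →
    Pre_min_special_positions matrix_list →
    Spec_min_special_positions matrix_list (min_special_positions matrix_list)

-- ===== LEMMAS AND PROOFS =====

-- first index at which two equal-length rows differ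
def fdRow : List Int → List Int → Option Int
  | x :: xs, y :: ys => if x = y then (fdRow xs ys).map (· + 1) else some 0
  | _, _ => none

-- first (row, column) position, in row-major order, at which two same-shape matrices differ
def fd2 : List (List Int) → List (List Int) → Option (Int × Int)
  | r :: rs, t :: ts =>
      match fdRow r t with
      | some y => some (0, y)
      | none => (fd2 rs ts).map (fun p => (p.1 + 1, p.2))
  | _, _ => none

def addOpt (s : PySem.Set (Int × Int)) : Option (Int × Int) → PySem.Set (Int × Int)
  | some p => PySem.Set.add s p
  | none => s

-- structural form of A's double loop over pairs, parametric in the per-pair outcome F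
def pairsFold (F : List (List Int) → List (List Int) → Option (Int × Int)) :
    List (List (List Int)) → PySem.Set (Int × Int) → PySem.Set (Int × Int)
  | [], s => s
  | m :: rest, s => pairsFold F rest (rest.foldl (fun s m' => addOpt s (F m m')) s)

-- the per-pair outcome under the PairOK precondition: (0,0) unless the matrices are equal
def gPair (m m' : List (List Int)) : Option (Int × Int) :=
  if m = m' then none else some (0, 0)

def InShape (R C : Nat) (m : List (List Int)) : Prop :=
  m.length = R ∧ ∀ r ∈ m, r.length = C

theorem fdRow_self (r : List Int) : fdRow r r = none := by
  induction r with
  | nil => rfl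
  | cons x xs ih => simp [fdRow, ih]

theorem fdRow_ne_none {r t : List Int} (hlen : r.length = t.length) (hne : r ≠ t) :
    fdRow r t ≠ none := by
  induction r generalizing t with
  | nil => cases t with
    | nil => exact absurd rfl hne
    | cons y ys => simp at hlen
  | cons x xs ih =>
    cases t with
    | nil => simp at hlen
    | cons y ys =>
      simp only [fdRow]
      by_cases hxy : x = y
      · subst hxy
        have : xs ≠ ys := fun h => hne (by rw [h])
        simpa using ih (by simpa using hlen) this
      · simp [hxy]

theorem fdRow_comm (r t : List Int) : fdRow r t = fdRow t r := by
  induction r generalizing t with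
  | nil => cases t <;> rfl
  | cons x xs ih =>
    cases t with
    | nil => rfl
    | cons y ys =>
      simp only [fdRow, eq_comm (a := x) (b := y)]
      by_cases h : y = x <;> simp [h, ih]

theorem fd2_comm (a b : List (List Int)) : fd2 a b = fd2 b a := by
  induction a generalizing b with
  | nil => cases b <;> rfl
  | cons r rs ih =>
    cases b with
    | nil => rfl
    | cons t ts => simp only [fd2, fdRow_comm r t, ih]

-- ordered-triple lemma, row level
theorem fdRow_triple {a b c : List Int} (hab : List.Lex (· < ·) a b)
    (hbc : List.Lex (· < ·) b c) (h1 : a.length = b.length) (h2 : b.length = c.length) :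
    fdRow a c = fdRow a b ∨ fdRow a c = fdRow b c := by
  induction a generalizing b c with
  | nil =>
    cases hab with
    | nil => simp at h1
  | cons u us ih =>
    cases hab with
    | rel huv =>
      cases hbc with
      | rel hvw =>
        left; simp [fdRow, (huv.trans hvw).ne, huv.ne]
      | cons hl =>
        left; simp [fdRow, huv.ne]
    | cons hl =>
      cases hbc with
      | rel huw =>
        right; simp [fdRow, huw.ne]
      | cons hl' =>
        rename_i vs ws
        have h1' : us.length = vs.length := by simpa using h1
        have h2' : vs.length = ws.length := by simpa using h2
        rcases ih hl hl' h1' h2' with h | h <;>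
          [left; right] <;> simp [fdRow, h]

-- ordered-triple lemma, matrix level
theorem fd2_triple {C : Nat} {a b c : List (List Int)}
    (hab : List.Lex (· < ·) a b) (hbc : List.Lex (· < ·) b c)
    (h1 : a.length = b.length) (h2 : b.length = c.length)
    (hra : ∀ r ∈ a, r.length = C) (hrb : ∀ r ∈ b, r.length = C)
    (hrc : ∀ r ∈ c, r.length = C) :
    fd2 a c = fd2 a b ∨ fd2 a c = fd2 b c := by
  induction a generalizing b c with
  | nil =>
    cases hab with
    | nil => simp at h1
  | cons u us ih =>
    cases hab with
    | rel huv =>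
      rename_i v vs
      cases hbc with
      | rel hvw =>
        rename_i w ws
        have huv' : List.Lex (· < ·) u v := huv
        have hvw' : List.Lex (· < ·) v w := hvw
        have lu : u.length = C := hra u (by simp)
        have lv : v.length = C := hrb v (by simp)
        have lw : w.length = C := hrc w (by simp)
        rcases fdRow_triple huv' hvw' (by omega) (by omega) with h | h
        · obtain ⟨y, hy⟩ := Option.ne_none_iff_exists'.mp
            (fdRow_ne_none (by omega : u.length = v.length) (ne_of_lt huv))
          left; simp [fd2, h, hy]
        · obtain ⟨y, hy⟩ := Option.ne_none_iff_exists'.mp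
            (fdRow_ne_none (by omega : v.length = w.length) (ne_of_lt hvw))
          right; simp [fd2, h, hy]
      | cons hl =>
        rename_i ws
        have lu : u.length = C := hra u (by simp)
        have lv : v.length = C := hrb v (by simp)
        obtain ⟨y, hy⟩ := Option.ne_none_iff_exists'.mp
          (fdRow_ne_none (by omega : u.length = v.length) (ne_of_lt huv))
        left; simp [fd2, hy]
    | cons hl =>
      cases hbc with
      | rel huw =>
        rename_i vs w ws
        have lu : u.length = C := hra u (by simp)
        have lw : w.length = C := hrc w (by simp)
        obtain ⟨y, hy⟩ := Option.ne_none_iff_exists'.mp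
          (fdRow_ne_none (by omega : u.length = w.length) (ne_of_lt huw))
        right; simp [fd2, hy]
      | cons hl' =>
        rename_i vs ws
        have h1' : us.length = vs.length := by simpa using h1
        have h2' : vs.length = ws.length := by simpa using h2
        rcases ih hl hl' h1' h2'
            (fun r hr => hra r (by simp [hr]))
            (fun r hr => hrb r (by simp [hr]))
            (fun r hr => hrc r (by simp [hr])) with h | h <;>
          [left; right] <;> simp [fd2, fdRow_self, h]


theorem mem_addOpt (s : PySem.Set (Int × Int)) (o : Option (Int × Int)) (p : Int × Int) :
    p ∈ addOpt s o ↔ p ∈ s ∨ o = some p := by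
  cases o with
  | none => simp [addOpt]
  | some q => simp [addOpt, PySem.Set.mem_add, eq_comm]

theorem nodup_addOpt (s : PySem.Set (Int × Int)) (o : Option (Int × Int)) (h : s.Nodup) :
    (addOpt s o).Nodup := by
  cases o with
  | none => exact h
  | some q => exact PySem.Set.nodup_add s q h

theorem mem_innerFold (F : List (List Int) → List (List Int) → Option (Int × Int))
    (l : List (List (List Int))) (m : List (List Int))
    (s : PySem.Set (Int × Int)) (p : Int × Int) :
    p ∈ l.foldl (fun s m' => addOpt s (F m m')) s ↔ p ∈ s ∨ ∃ b ∈ l, F m b = some p := by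
  induction l generalizing s with
  | nil => simp
  | cons b rest ih =>
    simp only [List.foldl_cons, ih, mem_addOpt, List.mem_cons]
    constructor
    · rintro (( h | h) | ⟨b', hb', h⟩)
      · exact Or.inl h
      · exact Or.inr ⟨b, Or.inl rfl, h⟩
      · exact Or.inr ⟨b', Or.inr hb', h⟩
    · rintro (h | ⟨b', (rfl | hb'), h⟩)
      · exact Or.inl (Or.inl h)
      · exact Or.inl (Or.inr h)
      · exact Or.inr ⟨b', hb', h⟩

theorem nodup_innerFold (F : List (List Int) → List (List Int) → Option (Int × Int))
    (l : List (List (List Int))) (m : List (List Int))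
    (s : PySem.Set (Int × Int)) (h : s.Nodup) :
    (l.foldl (fun s m' => addOpt s (F m m')) s).Nodup := by
  induction l generalizing s with
  | nil => exact h
  | cons b rest ih => exact ih _ (nodup_addOpt _ _ h)

theorem mem_pairsFold (F : List (List Int) → List (List Int) → Option (Int × Int))
    (l : List (List (List Int))) (s : PySem.Set (Int × Int)) (p : Int × Int) :
    p ∈ pairsFold F l s ↔ p ∈ s ∨ ∃ x y, [x, y].Sublist l ∧ F x y = some p := by
  induction l generalizing s with
  | nil =>
    simp only [pairsFold]
    constructor
    · exact Or.inl
    · rintro (h | ⟨x, y, hsub, _⟩)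
      · exact h
      · simpa using hsub.length_le
  | cons m rest ih =>
    simp only [pairsFold, ih, mem_innerFold]
    constructor
    · rintro ((h | ⟨b, hb, hfd⟩) | ⟨x, y, hsub, hfd⟩)
      · exact Or.inl h
      · exact Or.inr ⟨m, b, by
          simpa [List.cons_sublist_cons] using List.singleton_sublist.mpr hb, hfd⟩
      · exact Or.inr ⟨x, y, hsub.cons m, hfd⟩
    · rintro (h | ⟨x, y, hsub, hfd⟩)
      · exact Or.inl (Or.inl h)
      · rcases List.sublist_cons_iff.mp hsub with h' | ⟨r, hr, hr'⟩
        · exact Or.inr ⟨x, y, h', hfd⟩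
        · obtain ⟨rfl, hy⟩ : x = m ∧ [y].Sublist r := by
            cases hr; exact ⟨rfl, by rfl⟩
          exact Or.inl (Or.inr ⟨y, List.singleton_sublist.mp (hy.trans hr'), hfd⟩)

theorem nodup_pairsFold (F : List (List Int) → List (List Int) → Option (Int × Int))
    (l : List (List (List Int))) (s : PySem.Set (Int × Int)) (h : s.Nodup) :
    (pairsFold F l s).Nodup := by
  induction l generalizing s with
  | nil => exact h
  | cons m rest ih => exact ih _ (nodup_innerFold _ _ _ _ h)

-- bridge: A's inner y-loop computes fdRow on the rows, from position k on
theorem aLoopY_bridge (mi mj : List (List Int)) (x : Int) (ri rj : List Int)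
    (hri : PySem.List.pyGetD mi x [] = ri) (hrj : PySem.List.pyGetD mj x [] = rj)
    (C : Nat) (hCi : ri.length = C) (hCj : rj.length = C) :
    ∀ d k, C - k = d → k ≤ C → ∀ s,
      aLoopY mi mj x (PySem.List.pyRange (k : Int) (C : Int) 1) s =
        match fdRow (ri.drop k) (rj.drop k) with
        | some y => (PySem.Set.add s (x, (k : Int) + y), true)
        | none => (s, false) := by
  intro d
  induction d with
  | zero =>
    intro k hd hk s
    have hk' : k = C := by omega
    subst hk'
    rw [PySem.List.pyRange_one_eq_nil (by omega)]
    simp [aLoopY, List.drop_eq_nil_of_le (le_of_eq hCi), List.drop_eq_nil_of_le (le_of_eq hCj),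
      fdRow]
  | succ d ihd =>
    intro k hd hk s
    have hkC : k < C := by omega
    rw [PySem.List.pyRange_one_cons (by exact_mod_cast hkC)]
    have hgi : PySem.List.pyGetD ri (k : Int) 0 = ri[k] := by
      rw [PySem.List.pyGetD_natCast, List.getD_eq_getElem _ _ (show k < ri.length by omega)]
    have hgj : PySem.List.pyGetD rj (k : Int) 0 = rj[k] := by
      rw [PySem.List.pyGetD_natCast, List.getD_eq_getElem _ _ (show k < rj.length by omega)]
    have hdropi : ri.drop k = ri[k] :: ri.drop (k + 1) := List.drop_eq_getElem_cons (by omega)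
    have hdropj : rj.drop k = rj[k] :: rj.drop (k + 1) := List.drop_eq_getElem_cons (by omega)
    rw [hdropi, hdropj]
    simp only [aLoopY, hri, hrj, hgi, hgj, fdRow]
    by_cases hne : ri[k] = rj[k]
    · rw [if_neg (by simp [hne]), if_pos hne]
      rw [show ((k : Int) + 1) = ((k + 1 : Nat) : Int) by push_cast; ring,
        ihd (k + 1) (by omega) (by omega) s]
      cases hfd : fdRow (ri.drop (k + 1)) (rj.drop (k + 1)) with
      | none => simp
      | some y =>
        have harith : (k : Int) + 1 + y = (k : Int) + (y + 1) := by ring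
        simp [harith]
    · rw [if_pos (by simp [hne]), if_neg hne]
      simp

theorem map_shift_zero (o : Option (Int × Int)) :
    o.map (fun p => (p.1 + (0 : Int), p.2)) = o := by
  cases o with
  | none => rfl
  | some p => simp

-- bridge: A's x-loop computes fd2 on the matrices, from row k on
theorem aLoopX_bridge (mi mj : List (List Int)) (R C : Nat)
    (hmi : InShape R C mi) (hmj : InShape R C mj) :
    ∀ d k, R - k = d → k ≤ R → ∀ s,
      aLoopX mi mj (PySem.List.pyRange (k : Int) (R : Int) 1) s =
        addOpt s ((fd2 (mi.drop k) (mj.drop k)).map (fun p => (p.1 + (k : Int), p.2))) := by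
  intro d
  induction d with
  | zero =>
    intro k hd hk s
    have hk' : k = R := by omega
    subst hk'
    rw [PySem.List.pyRange_one_eq_nil (by omega)]
    simp [aLoopX, List.drop_eq_nil_of_le (le_of_eq hmi.1), List.drop_eq_nil_of_le (le_of_eq hmj.1),
      fd2, addOpt]
  | succ d ihd =>
    intro k hd hk s
    have hkR : k < R := by omega
    have hmiL : mi.length = R := hmi.1
    have hmjL : mj.length = R := hmj.1
    rw [PySem.List.pyRange_one_cons (by exact_mod_cast hkR)]
    have hg0 : PySem.List.pyGetD mi 0 [] = mi[0]'(by omega) := by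
      rw [show (0 : Int) = ((0 : Nat) : Int) by norm_num, PySem.List.pyGetD_natCast,
        List.getD_eq_getElem _ _ (show 0 < mi.length by omega)]
    have hgi : PySem.List.pyGetD mi (k : Int) [] = mi[k]'(by omega) := by
      rw [PySem.List.pyGetD_natCast, List.getD_eq_getElem _ _ (show k < mi.length by omega)]
    have hgj : PySem.List.pyGetD mj (k : Int) [] = mj[k]'(by omega) := by
      rw [PySem.List.pyGetD_natCast, List.getD_eq_getElem _ _ (show k < mj.length by omega)]
    have hlen0 : (mi[0]'(by omega)).length = C := hmi.2 _ (List.getElem_mem _)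
    have hleni : (mi[k]'(by omega)).length = C := hmi.2 _ (List.getElem_mem _)
    have hlenj : (mj[k]'(by omega)).length = C := hmj.2 _ (List.getElem_mem _)
    have hy := aLoopY_bridge mi mj (k : Int) (mi[k]'(by omega)) (mj[k]'(by omega)) hgi hgj C
      hleni hlenj C 0 (by omega) (by omega) s
    simp only [List.drop_zero] at hy
    have hdropi : mi.drop k = mi[k]'(by omega) :: mi.drop (k + 1) :=
      List.drop_eq_getElem_cons (by omega)
    have hdropj : mj.drop k = mj[k]'(by omega) :: mj.drop (k + 1) :=
      List.drop_eq_getElem_cons (by omega)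
    rw [hdropi, hdropj]
    simp only [aLoopX, hg0, hlen0]
    rw [show ((0 : Nat) : Int) = (0 : Int) by norm_num] at hy
    rw [hy]
    cases hfd : fdRow (mi[k]'(by omega)) (mj[k]'(by omega)) with
    | some y =>
      simp [fd2, hfd, addOpt]
    | none =>
      simp only [fd2, hfd]
      rw [show ((k : Int) + 1) = ((k + 1 : Nat) : Int) by push_cast; ring,
        ihd (k + 1) (by omega) (by omega) s]
      cases hf2 : fd2 (mi.drop (k + 1)) (mj.drop (k + 1)) with
      | none => simp
      | some q =>
        have harith : q.1 + ((k : Int) + 1) = q.1 + 1 + (k : Int) := by ring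
        simp [addOpt, harith]

-- the step hypothesis: one aLoopX call on the pair (l[i], mj) realises the outcome F
def StepHyp (F : List (List Int) → List (List Int) → Option (Int × Int))
    (l : List (List (List Int))) : Prop :=
  ∀ (k : Nat) (hk : k < l.length), ∀ mj ∈ l.drop (k + 1), ∀ s,
    aLoopX (l[k]'hk) mj (PySem.List.pyRange 0 (((l[k]'hk).length : Int)) 1) s =
      addOpt s (F (l[k]'hk) mj)

-- bridge: the inner j-loop of A, for a fixed i, is a structural fold over the tail
theorem innerFold_bridge (F : List (List Int) → List (List Int) → Option (Int × Int))
    (l : List (List (List Int))) (hstep : StepHyp F l) (i : Nat) (hi : i < l.length)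
    (s : PySem.Set (Int × Int)) :
    (PySem.List.pyRange ((i : Int) + 1) ((l.length : Int)) 1).foldl
      (fun s j => aLoopX (PySem.List.pyGetD l (i : Int) []) (PySem.List.pyGetD l j [])
        (PySem.List.pyRange 0 (((PySem.List.pyGetD l (i : Int) []).length : Int)) 1) s) s =
    (l.drop (i + 1)).foldl (fun s mj => addOpt s (F (l[i]'hi) mj)) s := by
  have hgi : PySem.List.pyGetD l (i : Int) [] = l[i]'hi := by
    rw [PySem.List.pyGetD_natCast, List.getD_eq_getElem _ _ hi]
  simp only [hgi]
  have := PySem.List.foldl_pyRange_pyGetD' l []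
    (fun s mj => aLoopX (l[i]'hi) mj (PySem.List.pyRange 0 (((l[i]'hi).length : Int)) 1) s) s
    (a := (i : Int) + 1) (by omega)
  rw [this]
  have htonat : ((i : Int) + 1).toNat = i + 1 := by omega
  rw [htonat]
  exact PySem.List.foldl_congr_mem _ _ _ _ (fun acc mj hmj => hstep i hi mj hmj acc)

-- bridge: A's whole double loop is pairsFold
theorem outer_bridge (F : List (List Int) → List (List Int) → Option (Int × Int))
    (l : List (List (List Int))) (hstep : StepHyp F l) :
    ∀ d k, l.length - k = d → k ≤ l.length → ∀ s,
      (PySem.List.pyRange (k : Int) ((l.length : Int) - 1) 1).foldl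
        (fun s i =>
          (PySem.List.pyRange (i + 1) ((l.length : Int)) 1).foldl
            (fun s j => aLoopX (PySem.List.pyGetD l i []) (PySem.List.pyGetD l j [])
              (PySem.List.pyRange 0 (((PySem.List.pyGetD l i []).length : Int)) 1) s) s) s =
      pairsFold F (l.drop k) s := by
  intro d
  induction d with
  | zero =>
    intro k hd hk s
    have hk' : k = l.length := by omega
    subst hk'
    rw [PySem.List.pyRange_one_eq_nil (by omega), List.drop_eq_nil_of_le (le_refl _)]
    rfl
  | succ d ihd =>
    intro k hd hk s
    have hkl : k < l.length := by omega
    by_cases hlast : k + 1 = l.length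
    · rw [PySem.List.pyRange_one_eq_nil (by omega)]
      have : l.drop k = [l[k]'hkl] := by
        rw [List.drop_eq_getElem_cons hkl, List.drop_eq_nil_of_le (by omega)]
      rw [this]
      rfl
    · rw [PySem.List.pyRange_one_cons (by omega)]
      simp only [List.foldl_cons]
      rw [innerFold_bridge F l hstep k hkl s]
      rw [show ((k : Int) + 1) = ((k + 1 : Nat) : Int) by push_cast; ring,
        ihd (k + 1) (by omega) (by omega)]
      rw [List.drop_eq_getElem_cons hkl]
      rfl

-- A's return value, given the step hypothesis
theorem a_eval (F : List (List Int) → List (List Int) → Option (Int × Int))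
    (l : List (List (List Int))) (hstep : StepHyp F l) :
    min_special_positions l = PySem.Set.len (pairsFold F l PySem.Set.empty) := by
  have hob := outer_bridge F l hstep l.length 0 (by omega) (by omega) PySem.Set.empty
  rw [Nat.cast_zero, List.drop_zero] at hob
  unfold min_special_positions
  simp only []
  rw [hob]

-- the step hypothesis holds for fd2 on a uniformly shaped list
theorem step_uniform (l : List (List (List Int))) (R C : Nat)
    (hshape : ∀ m ∈ l, InShape R C m) : StepHyp fd2 l := by
  intro k hk mj hmj s
  have hsi : InShape R C (l[k]'hk) := hshape _ (List.getElem_mem _)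
  have hsj : InShape R C mj := hshape _ (List.mem_of_mem_drop hmj)
  have hlen : (((l[k]'hk).length : Nat) : Int) = ((R : Nat) : Int) := by rw [hsi.1]
  rw [hlen, show (0 : Int) = ((0 : Nat) : Int) by norm_num,
    aLoopX_bridge _ _ R C hsi hsj R 0 (by omega) (by omega) s]
  simp [map_shift_zero]

-- bridge: Source B's inner next() computes fdRow
theorem bNext_bridge (ra rb : List Int) :
    ∀ (k : Int), bNext (PySem.List.enumerate (ra.zip rb) k) = (fdRow ra rb).map (· + k) := by
  induction ra generalizing rb with
  | nil => intro k; cases rb <;> simp [bNext, fdRow, PySem.List.enumerate]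
  | cons u us ih =>
    intro k
    cases rb with
    | nil => simp [bNext, fdRow, PySem.List.enumerate]
    | cons v vs =>
      rw [List.zip_cons_cons, PySem.List.enumerate_cons]
      by_cases huv : u = v
      · subst huv
        simp only [bNext, fdRow]
        rw [if_neg (show ¬(u ≠ u) by simp)]
        simp only [if_true]
        rw [ih vs (k + 1)]
        cases hf : fdRow us vs with
        | none => simp
        | some y => simp; ring
      · simp [bNext, huv, fdRow]

-- bridge: Source B's row scan computes fd2
theorem bFindPos_bridge (C : Nat) (a b : List (List Int))
    (ha : ∀ r ∈ a, r.length = C) (hb : ∀ r ∈ b, r.length = C) :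
    ∀ (k : Int), bFindPos (PySem.List.enumerate (a.zip b) k) =
      (fd2 a b).map (fun p => (p.1 + k, p.2)) := by
  induction a generalizing b with
  | nil => intro k; cases b <;> simp [bFindPos, fd2, PySem.List.enumerate]
  | cons ra as ih =>
    intro k
    cases b with
    | nil => simp [bFindPos, fd2, PySem.List.enumerate]
    | cons rb bs =>
      rw [List.zip_cons_cons, PySem.List.enumerate_cons]
      by_cases hr : ra = rb
      · subst hr
        simp only [bFindPos, fd2, fdRow_self]
        rw [if_neg (show ¬(ra ≠ ra) by simp)]
        rw [ih bs (fun r hr => ha r (by simp [hr])) (fun r hr => hb r (by simp [hr])) (k + 1)]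
        cases hf : fd2 as bs with
        | none => simp
        | some q => simp; ring
      · have hla : ra.length = C := ha ra (by simp)
        have hlb : rb.length = C := hb rb (by simp)
        obtain ⟨y, hy⟩ := Option.ne_none_iff_exists'.mp
          (fdRow_ne_none (by omega : ra.length = rb.length) hr)
        simp [bFindPos, hr, fd2, hy, bNext_bridge]

theorem mem_bLoop (abs : List (List (List Int) × List (List Int)))
    (s : PySem.Set (Int × Int)) (p : Int × Int) :
    p ∈ bLoop abs s ↔ p ∈ s ∨ ∃ ab ∈ abs,
      bFindPos (PySem.List.enumerate (ab.1.zip ab.2) 0) = some p := by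
  induction abs generalizing s with
  | nil => simp [bLoop]
  | cons ab rest ih =>
    simp only [bLoop]
    cases hf : bFindPos (PySem.List.enumerate (ab.1.zip ab.2) 0) with
    | some q =>
      rw [ih]
      simp only [PySem.Set.mem_add, List.mem_cons]
      constructor
      · rintro ((h | rfl) | ⟨ab', hab', h⟩)
        · exact Or.inl h
        · exact Or.inr ⟨ab, Or.inl rfl, hf⟩
        · exact Or.inr ⟨ab', Or.inr hab', h⟩
      · rintro (h | ⟨ab', (rfl | hab'), h⟩)
        · exact Or.inl (Or.inl h)
        · exact Or.inl (Or.inr (by rw [hf] at h; exact (Option.some_inj.mp h).symm))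
        · exact Or.inr ⟨ab', hab', h⟩
    | none =>
      rw [ih]
      constructor
      · rintro (h | ⟨ab', hab', h⟩)
        · exact Or.inl h
        · exact Or.inr ⟨ab', List.mem_cons_of_mem _ hab', h⟩
      · rintro (h | ⟨ab', hab', h⟩)
        · exact Or.inl h
        · rcases List.mem_cons.mp hab' with rfl | hab''
          · rw [hf] at h; exact absurd h (by simp)
          · exact Or.inr ⟨ab', hab'', h⟩

theorem nodup_bLoop (abs : List (List (List Int) × List (List Int)))
    (s : PySem.Set (Int × Int)) (h : s.Nodup) : (bLoop abs s).Nodup := by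
  induction abs generalizing s with
  | nil => exact h
  | cons ab rest ih =>
    simp only [bLoop]
    cases bFindPos (PySem.List.enumerate (ab.1.zip ab.2) 0) with
    | some q => exact ih _ (PySem.Set.nodup_add _ _ h)
    | none => exact ih _ h

theorem pair_perm {α : Type} {x y u v : α} (h : [x, y].Perm [u, v]) :
    (x = u ∧ y = v) ∨ (x = v ∧ y = u) := by
  have hx : x ∈ [u, v] := h.mem_iff.mp (by simp)
  rcases List.mem_cons.mp hx with rfl | hx'
  · left
    refine ⟨rfl, ?_⟩
    have h2 := (List.perm_cons x).mp h
    simpa [List.perm_singleton] using h2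
  · right
    have hxv : x = v := by simpa using hx'
    subst hxv
    refine ⟨rfl, ?_⟩
    have h2 : [x, y].Perm [x, u] := h.trans (List.Perm.swap x u [])
    have h3 := (List.perm_cons x).mp h2
    simpa [List.perm_singleton] using h3

theorem subperm_pair {α : Type} {u v : α} {t : List α} (h : [u, v].Subperm t) :
    ∃ x y, [x, y].Sublist t ∧ ((x = u ∧ y = v) ∨ (x = v ∧ y = u)) := by
  obtain ⟨l2, hp, hs⟩ := h
  have hlen : l2.length = 2 := by simpa using hp.length_eq
  cases l2 with
  | nil => simp at hlen
  | cons x r =>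
    cases r with
    | nil => simp at hlen
    | cons y r2 =>
      cases r2 with
      | nil => exact ⟨x, y, hs, pair_perm hp⟩
      | cons z r3 => simp at hlen

theorem adj_sublist {α : Type} : ∀ (t : List α) (ab : α × α),
    ab ∈ t.zip t.tail → [ab.1, ab.2].Sublist t := by
  intro t
  induction t with
  | nil => intro ab hab; simp at hab
  | cons m rest ih =>
    intro ab hab
    cases rest with
    | nil => simp at hab
    | cons c r =>
      rw [show (m :: c :: r).tail = c :: r from rfl, List.zip_cons_cons] at hab
      rcases List.mem_cons.mp hab with rfl | hab'
      · simp
      · exact (ih ab (by simpa using hab')).cons m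

theorem K2 (R C : Nat) : ∀ (rest : List (List (List Int))) (m v : List (List Int)),
    (∀ x ∈ m :: rest, InShape R C x) → (m :: rest).Pairwise (· ≤ ·) →
    v ∈ rest → ∀ p, fd2 m v = some p →
    ∃ ab ∈ (m :: rest).zip rest, fd2 ab.1 ab.2 = some p := by
  intro rest
  induction rest with
  | nil => intro m v _ _ hv; simp at hv
  | cons c rest' ih =>
    intro m v hshape hsort hv p hp
    rcases List.mem_cons.mp hv with rfl | hv'
    · exact ⟨(m, v), by simp [List.zip_cons_cons], hp⟩
    · have hmc : m ≤ c := (List.pairwise_cons.mp hsort).1 c (by simp)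
      have hsort' : (c :: rest').Pairwise (· ≤ ·) := (List.pairwise_cons.mp hsort).2
      have hcv : c ≤ v := (List.pairwise_cons.mp hsort').1 v hv'
      have hshape' : ∀ x ∈ c :: rest', InShape R C x :=
        fun x hx => hshape x (List.mem_cons_of_mem m hx)
      rcases hmc.lt_or_eq with hlt | heq
      · rcases hcv.lt_or_eq with hlt2 | heq2
        · have hLmc : List.Lex (· < ·) m c := hlt
          have hLcv : List.Lex (· < ·) c v := hlt2
          have sm := hshape m (by simp)
          have sc := hshape c (by simp)
          have sv := hshape v (by simp [hv'])
          rcases fd2_triple (C := C) hLmc hLcv (sm.1.trans sc.1.symm) (sc.1.trans sv.1.symm)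
              sm.2 sc.2 sv.2 with h | h
          · exact ⟨(m, c), by simp [List.zip_cons_cons], h.symm.trans hp⟩
          · obtain ⟨ab, hab, hfd⟩ := ih c v hshape' hsort' hv' p (h.symm.trans hp)
            exact ⟨ab, by rw [List.zip_cons_cons]; exact List.mem_cons_of_mem _ hab, hfd⟩
        · exact ⟨(m, c), by simp [List.zip_cons_cons], by rw [heq2]; exact hp⟩
      · obtain ⟨ab, hab, hfd⟩ := ih c v hshape' hsort' hv' p (by rw [← heq]; exact hp)
        exact ⟨ab, by rw [List.zip_cons_cons]; exact List.mem_cons_of_mem _ hab, hfd⟩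

theorem pair_to_adj (R C : Nat) : ∀ (t : List (List (List Int))),
    (∀ x ∈ t, InShape R C x) → t.Pairwise (· ≤ ·) →
    ∀ u v p, [u, v].Sublist t → fd2 u v = some p →
    ∃ ab ∈ t.zip t.tail, fd2 ab.1 ab.2 = some p := by
  intro t
  induction t with
  | nil => intro _ _ u v p hsub _; simpa using hsub.length_le
  | cons m rest ih =>
    intro hshape hsort u v p hsub hp
    rcases List.sublist_cons_iff.mp hsub with h' | ⟨r, hr, hr'⟩
    · obtain ⟨ab, hab, hfd⟩ := ih (fun x hx => hshape x (List.mem_cons_of_mem m hx))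
        (List.pairwise_cons.mp hsort).2 u v p h' hp
      cases rest with
      | nil => simp at hab
      | cons c r2 =>
        refine ⟨ab, ?_, hfd⟩
        rw [show (m :: c :: r2).tail = c :: r2 from rfl, List.zip_cons_cons]
        exact List.mem_cons_of_mem _ hab
    · obtain ⟨hu, hvr⟩ : u = m ∧ [v].Sublist r := by
        cases hr; exact ⟨rfl, by rfl⟩
      subst hu
      have hv : v ∈ rest := List.singleton_sublist.mp (hvr.trans hr')
      exact K2 R C rest u v hshape hsort hv p hp

-- the heart of the equivalence: pairwise first diffs = adjacent first diffs of the sorted list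
theorem main_mem (l : List (List (List Int))) (R C : Nat)
    (hshape : ∀ m ∈ l, InShape R C m) (p : Int × Int) :
    (∃ x y, [x, y].Sublist l ∧ fd2 x y = some p) ↔
    (∃ ab ∈ (PySem.List.sorted l (fun x => x) false).zip
        (PySem.List.sorted l (fun x => x) false).tail, fd2 ab.1 ab.2 = some p) := by
  set t := PySem.List.sorted l (fun x => x) false with ht
  have hperm : t.Perm l := PySem.List.sorted_perm l (fun x => x) false
  have hshapeT : ∀ m ∈ t, InShape R C m := fun m hm =>
    hshape m ((PySem.List.mem_sorted l (fun x => x) false m).mp hm)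
  have hsortT : t.Pairwise (· ≤ ·) := by
    rw [ht, show PySem.List.sorted l (fun x => x) false =
      @PySem.List.sorted _ _ List.instLinearOrder.toLT LinearOrder.toDecidableLT l
        (fun x => x) false by congr 1]
    exact PySem.List.sorted_pairwise l (fun x => x)
  constructor
  · rintro ⟨x, y, hsub, hfd⟩
    have hsp : [x, y].Subperm t := hsub.subperm.trans hperm.symm.subperm
    obtain ⟨x', y', hsub', hor⟩ := subperm_pair hsp
    have hfd' : fd2 x' y' = some p := by
      rcases hor with ⟨rfl, rfl⟩ | ⟨rfl, rfl⟩
      · exact hfd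
      · rw [fd2_comm]; exact hfd
    exact pair_to_adj R C t hshapeT hsortT x' y' p hsub' hfd'
  · rintro ⟨ab, hab, hfd⟩
    have hsub : [ab.1, ab.2].Sublist t := adj_sublist t ab hab
    have hsp : [ab.1, ab.2].Subperm l := hsub.subperm.trans hperm.subperm
    obtain ⟨x', y', hsub', hor⟩ := subperm_pair hsp
    refine ⟨x', y', hsub', ?_⟩
    rcases hor with ⟨rfl, rfl⟩ | ⟨rfl, rfl⟩
    · exact hfd
    · rw [fd2_comm]; exact hfd

theorem zip_bridge (t : List (List (List Int))) (R C : Nat)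
    (hshapeT : ∀ m ∈ t, InShape R C m) :
    ∀ ab ∈ t.zip t.tail,
      bFindPos (PySem.List.enumerate (ab.1.zip ab.2) 0) = fd2 ab.1 ab.2 := by
  rintro ⟨a, b⟩ hab
  obtain ⟨ha, hb⟩ := List.of_mem_zip hab
  have hb' : b ∈ t := List.mem_of_mem_tail hb
  rw [bFindPos_bridge C a b (hshapeT a ha).2 (hshapeT b hb').2 0]
  simp only []
  exact map_shift_zero _

theorem aLoopY_self (mi : List (List Int)) (x : Int) :
    ∀ (ys : List Int) (s : PySem.Set (Int × Int)), aLoopY mi mi x ys s = (s, false) := by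
  intro ys
  induction ys with
  | nil => intro s; rfl
  | cons y ys ih => intro s; simp [aLoopY, ih]

theorem aLoopX_self (mi : List (List Int)) :
    ∀ (xs : List Int) (s : PySem.Set (Int × Int)), aLoopX mi mi xs s = s := by
  intro xs
  induction xs with
  | nil => intro s; rfl
  | cons x xs ih => intro s; simp [aLoopX, aLoopY_self, ih]

theorem aLoopX_fcdiff (mi mj : List (List Int)) (hi : NE1 mi) (hj : NE1 mj)
    (hfc : (mi.headD []).headD 0 ≠ (mj.headD []).headD 0) (s : PySem.Set (Int × Int)) :
    aLoopX mi mj (PySem.List.pyRange 0 ((mi.length : Int)) 1) s = PySem.Set.add s (0, 0) := by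
  obtain ⟨r0, mi', rfl⟩ : ∃ r0 mi', mi = r0 :: mi' := by
    cases mi with
    | nil => exact absurd rfl hi.1
    | cons a b => exact ⟨a, b, rfl⟩
  obtain ⟨t0, mj', rfl⟩ : ∃ t0 mj', mj = t0 :: mj' := by
    cases mj with
    | nil => exact absurd rfl hj.1
    | cons a b => exact ⟨a, b, rfl⟩
  obtain ⟨c0, r0', rfl⟩ : ∃ c0 r0', r0 = c0 :: r0' := by
    cases r0 with
    | nil => simp [NE1] at hi
    | cons a b => exact ⟨a, b, rfl⟩
  obtain ⟨d0, t0', rfl⟩ : ∃ d0 t0', t0 = d0 :: t0' := by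
    cases t0 with
    | nil => simp [NE1] at hj
    | cons a b => exact ⟨a, b, rfl⟩
  have hcd : c0 ≠ d0 := by simpa using hfc
  rw [PySem.List.pyRange_one_cons (by push_cast [List.length_cons]; omega)]
  simp only [aLoopX, PySem.List.pyGetD_zero_cons]
  rw [PySem.List.pyRange_one_cons (by push_cast [List.length_cons]; omega)]
  simp [aLoopY, PySem.List.pyGetD_zero_cons, hcd]

-- the step hypothesis holds for gPair on a PairOK-pairwise list
theorem step_pairOK (l : List (List (List Int))) (hp : l.Pairwise PairOK) :
    StepHyp gPair l := by
  intro k hk mj hmj s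
  have hrel : PairOK (l[k]'hk) mj := by
    have hpw : (l.drop k).Pairwise PairOK := hp.sublist (List.drop_sublist _ _)
    rw [List.drop_eq_getElem_cons hk] at hpw
    exact (List.pairwise_cons.mp hpw).1 mj hmj
  rcases hrel with ⟨heq, _⟩ | ⟨ha, hb, hfc⟩
  · rw [heq]
    simp [aLoopX_self, gPair, addOpt]
  · have hne : (l[k]'hk) ≠ mj := fun h => hfc (by rw [h])
    rw [aLoopX_fcdiff _ _ ha hb hfc s]
    simp [gPair, hne, addOpt]

theorem bFindPos_self (a : List (List Int)) :
    ∀ (k : Int), bFindPos (PySem.List.enumerate (a.zip a) k) = none := by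
  induction a with
  | nil => intro k; rfl
  | cons r as ih =>
    intro k
    rw [List.zip_cons_cons, PySem.List.enumerate_cons]
    simp [bFindPos, ih]

theorem bFindPos_fcdiff (a b : List (List Int)) (ha : NE1 a) (hb : NE1 b)
    (hfc : (a.headD []).headD 0 ≠ (b.headD []).headD 0) :
    bFindPos (PySem.List.enumerate (a.zip b) 0) = some (0, 0) := by
  obtain ⟨ra, as, rfl⟩ : ∃ ra as, a = ra :: as := by
    cases a with
    | nil => exact absurd rfl ha.1
    | cons x y => exact ⟨x, y, rfl⟩
  obtain ⟨rb, bs, rfl⟩ : ∃ rb bs, b = rb :: bs := by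
    cases b with
    | nil => exact absurd rfl hb.1
    | cons x y => exact ⟨x, y, rfl⟩
  obtain ⟨c0, ra', rfl⟩ : ∃ c0 ra', ra = c0 :: ra' := by
    cases ra with
    | nil => simp [NE1] at ha
    | cons x y => exact ⟨x, y, rfl⟩
  obtain ⟨d0, rb', rfl⟩ : ∃ d0 rb', rb = d0 :: rb' := by
    cases rb with
    | nil => simp [NE1] at hb
    | cons x y => exact ⟨x, y, rfl⟩
  have hcd : c0 ≠ d0 := by simpa using hfc
  have hrow : (c0 :: ra') ≠ (d0 :: rb') := fun h => hcd (List.cons.inj h).1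
  rw [List.zip_cons_cons, PySem.List.enumerate_cons]
  simp only [bFindPos]
  rw [if_pos (by simpa using hrow)]
  rw [List.zip_cons_cons, PySem.List.enumerate_cons]
  simp [bNext, hcd]

theorem pairOK_symm : Symmetric PairOK := by
  intro a b h
  rcases h with ⟨rfl, hr⟩ | ⟨ha, hb, hfc⟩
  · exact Or.inl ⟨rfl, hr⟩
  · exact Or.inr ⟨hb, ha, hfc.symm⟩

theorem zip_bridge3 (t : List (List (List Int))) (hp : t.Pairwise PairOK) :
    ∀ ab ∈ t.zip t.tail,
      bFindPos (PySem.List.enumerate (ab.1.zip ab.2) 0) = gPair ab.1 ab.2 := by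
  intro ab hab
  have hrel : PairOK ab.1 ab.2 := by
    have := hp.sublist (adj_sublist t ab hab)
    exact (List.pairwise_cons.mp this).1 ab.2 (by simp)
  rcases hrel with ⟨heq, _⟩ | ⟨ha, hb, hfc⟩
  · rw [← heq, bFindPos_self]
    simp [gPair]
  · have hne : ab.1 ≠ ab.2 := fun h => hfc (by rw [h])
    rw [bFindPos_fcdiff ab.1 ab.2 ha hb hfc]
    simp [gPair, hne]

theorem eq_of_all_adj_eq {α : Type} : ∀ (t : List α),
    (∀ ab ∈ t.zip t.tail, ab.1 = ab.2) → ∀ u v, [u, v].Sublist t → u = v := by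
  intro t
  induction t with
  | nil => intro _ u v hsub; simpa using hsub.length_le
  | cons m rest ih =>
    intro hadj u v hsub
    have hrest : ∀ ab ∈ rest.zip rest.tail, ab.1 = ab.2 := by
      cases rest with
      | nil => simp
      | cons c r =>
        intro ab hab
        refine hadj ab ?_
        rw [show (m :: c :: r).tail = c :: r from rfl, List.zip_cons_cons]
        exact List.mem_cons_of_mem _ hab
    have hall : ∀ w ∈ rest, w = m := by
      cases rest with
      | nil => simp
      | cons c r =>
        have hmc : m = c := hadj (m, c) (by simp [List.zip_cons_cons])
        intro w hw
        rcases List.mem_cons.mp hw with rfl | hw'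
        · exact hmc.symm
        · have hsub2 : [c, w].Sublist (c :: r) :=
            List.cons_sublist_cons.mpr (List.singleton_sublist.mpr hw')
          have hcw := ih hrest c w hsub2
          rw [← hcw, ← hmc]
    rcases List.sublist_cons_iff.mp hsub with h' | ⟨r2, hr2, hr2'⟩
    · exact ih hrest u v h'
    · obtain ⟨hu, hvr⟩ : u = m ∧ [v].Sublist r2 := by
        cases hr2; exact ⟨rfl, by rfl⟩
      subst hu
      exact (hall v (List.singleton_sublist.mp (hvr.trans hr2'))).symm

theorem gPair_some {x y : List (List Int)} {p : Int × Int} (h : gPair x y = some p) :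
    x ≠ y ∧ p = (0, 0) := by
  by_cases hxy : x = y
  · simp [gPair, hxy] at h
  · refine ⟨hxy, ?_⟩
    simp [gPair, hxy] at h
    exact h.symm

-- the PairOK analogue of main_mem
theorem main_mem3 (l : List (List (List Int))) (hp : l.Pairwise PairOK) (p : Int × Int) :
    (∃ x y, [x, y].Sublist l ∧ gPair x y = some p) ↔
    (∃ ab ∈ (PySem.List.sorted l (fun x => x) false).zip
        (PySem.List.sorted l (fun x => x) false).tail, gPair ab.1 ab.2 = some p) := by
  set t := PySem.List.sorted l (fun x => x) false with ht
  have hperm : t.Perm l := PySem.List.sorted_perm l (fun x => x) false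
  constructor
  · rintro ⟨x, y, hsub, hg⟩
    obtain ⟨hne, rfl⟩ := gPair_some hg
    by_contra hno
    push_neg at hno
    have hadj : ∀ ab ∈ t.zip t.tail, ab.1 = ab.2 := by
      intro ab hab
      by_contra hne2
      exact hno ab hab (by simp [gPair, hne2])
    have hsp : [x, y].Subperm t := hsub.subperm.trans hperm.symm.subperm
    obtain ⟨x', y', hsub', hor⟩ := subperm_pair hsp
    have heq := eq_of_all_adj_eq t hadj x' y' hsub'
    rcases hor with ⟨rfl, rfl⟩ | ⟨rfl, rfl⟩
    · exact hne heq
    · exact hne heq.symm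
  · rintro ⟨ab, hab, hg⟩
    obtain ⟨hne, rfl⟩ := gPair_some hg
    have hsub : [ab.1, ab.2].Sublist t := adj_sublist t ab hab
    have hsp : [ab.1, ab.2].Subperm l := hsub.subperm.trans hperm.subperm
    obtain ⟨x', y', hsub', hor⟩ := subperm_pair hsp
    have hne' : x' ≠ y' := by
      rcases hor with ⟨rfl, rfl⟩ | ⟨rfl, rfl⟩
      · exact hne
      · exact hne.symm
    exact ⟨x', y', hsub', by simp [gPair, hne']⟩

-- common glue: once both ports realise F on pairs / adjacent pairs, the lengths agree
theorem glue (l : List (List (List Int)))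
    (F : List (List Int) → List (List Int) → Option (Int × Int))
    (hstep : StepHyp F l)
    (hzipB : ∀ ab ∈ (PySem.List.sorted l (fun x => x) false).zip
        (PySem.List.sorted l (fun x => x) false).tail,
      bFindPos (PySem.List.enumerate (ab.1.zip ab.2) 0) = F ab.1 ab.2)
    (hmm : ∀ p, (∃ x y, [x, y].Sublist l ∧ F x y = some p) ↔
      (∃ ab ∈ (PySem.List.sorted l (fun x => x) false).zip
          (PySem.List.sorted l (fun x => x) false).tail, F ab.1 ab.2 = some p)) :
    min_special_positions l = min_special_positions_alt l := by
  rw [a_eval F l hstep]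
  unfold min_special_positions_alt
  simp only []
  set t := PySem.List.sorted l (fun x => x) false with ht
  have hndA : (pairsFold F l PySem.Set.empty).Nodup := nodup_pairsFold _ _ _ List.nodup_nil
  have hndB : (bLoop (t.zip t.tail) PySem.Set.empty).Nodup := nodup_bLoop _ _ List.nodup_nil
  have hmem : ∀ p, p ∈ pairsFold F l PySem.Set.empty ↔
      p ∈ bLoop (t.zip t.tail) PySem.Set.empty := by
    intro p
    rw [mem_pairsFold, mem_bLoop]
    have hnil : p ∈ (PySem.Set.empty : PySem.Set (Int × Int)) ↔ False := by
      simp [PySem.Set.empty]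
    rw [hnil]
    simp only [false_or]
    rw [hmm p]
    constructor
    · rintro ⟨ab, hab, hfd⟩
      refine ⟨ab, hab, ?_⟩
      rw [hzipB ab hab]
      exact hfd
    · rintro ⟨ab, hab, hfd⟩
      rw [hzipB ab hab] at hfd
      exact ⟨ab, hab, hfd⟩
  have hperm2 := (List.perm_ext_iff_of_nodup hndA hndB).mpr hmem
  simp only [PySem.Set.len]
  exact_mod_cast hperm2.length_eq

-- ===== VERDICT (by name: the statement is the Claim_ definition above) =====
theorem min_special_positions_spec : Claim_equal_min_special_positions := by
  intro l _hdom hpre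
  unfold Spec_min_special_positions
  rcases hpre with hsmall | huni | hpair
  · cases l with
    | nil => decide
    | cons m rest =>
      cases rest with
      | cons m2 r2 => simp at hsmall
      | nil =>
        have hA : min_special_positions [m] = 0 := by
          unfold min_special_positions
          simp [PySem.List.pyRange_one_eq_nil, PySem.Set.len, PySem.Set.empty]
        have hB : min_special_positions_alt [m] = 0 := rfl
        rw [hA, hB]
  · cases l with
    | nil => decide
    | cons m0 rest =>
      have hshape : ∀ x ∈ (m0 :: rest), InShape m0.length ((m0.headD []).length) x := by
        intro x hx
        refine ⟨(huni x hx m0 (by simp)).1, ?_⟩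
        intro r hr
        cases hm : m0 with
        | nil =>
          have hx0 : x.length = 0 := by
            have := (huni x hx m0 (by simp)).1
            simpa [hm] using this
          rw [List.length_eq_zero_iff] at hx0
          subst hx0
          simp at hr
        | cons r0 m0t =>
          have := ((huni x hx m0 (by simp)).2 r hr r0 (by simp [hm]))
          simpa [hm] using this
      have hshapeT : ∀ m ∈ PySem.List.sorted (m0 :: rest) (fun x => x) false,
          InShape m0.length ((m0.headD []).length) m := fun m hm =>
        hshape m ((PySem.List.mem_sorted _ (fun x => x) false m).mp hm)
      exact glue (m0 :: rest) fd2 (step_uniform _ _ _ hshape)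
        (zip_bridge _ _ _ hshapeT) (main_mem (m0 :: rest) _ _ hshape)
  · have hpairT : (PySem.List.sorted l (fun x => x) false).Pairwise PairOK :=
      ((PySem.List.sorted_perm l (fun x => x) false).pairwise_iff (fun h => pairOK_symm h)).mpr hpair
    exact glue l gPair (step_pairOK l hpair) (zip_bridge3 _ hpairT) (main_mem3 l hpair)
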